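-- pv_equiv track=rewrite | github.com/AmirMotefaker/myCodes | find_max_mark_name_in _list.py | find_max_mark
-- ===== SOURCE A (Python) =====
-- def find_max_mark(mark_list):
--     max_mark = 0
--     max_mark_name = ''
--
--     for name, mark in mark_list:
--         if mark >= max_mark:
--             max_mark = mark
--             max_mark_name = name
--
--     return max_mark, max_mark_name
-- ===== SOURCE B (Python) =====
-- def find_max_mark(mark_list):
--     items = list(mark_list)
--     best = max([0] + [m for _, m in items])
--     name = ''
--     for n, m in items:
--         if m == best:
--             name = n
--     return best, name
-- ===== Notes on version B (the rewrite author's own statement) =====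
-- stated objective: alternative
-- what changed: Replaces A's single running-max pass with a two-pass compute-then-locate shape: first take the maximum mark (floored at 0), then a second scan records the last name whose mark equals that maximum.
import Mathlib
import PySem

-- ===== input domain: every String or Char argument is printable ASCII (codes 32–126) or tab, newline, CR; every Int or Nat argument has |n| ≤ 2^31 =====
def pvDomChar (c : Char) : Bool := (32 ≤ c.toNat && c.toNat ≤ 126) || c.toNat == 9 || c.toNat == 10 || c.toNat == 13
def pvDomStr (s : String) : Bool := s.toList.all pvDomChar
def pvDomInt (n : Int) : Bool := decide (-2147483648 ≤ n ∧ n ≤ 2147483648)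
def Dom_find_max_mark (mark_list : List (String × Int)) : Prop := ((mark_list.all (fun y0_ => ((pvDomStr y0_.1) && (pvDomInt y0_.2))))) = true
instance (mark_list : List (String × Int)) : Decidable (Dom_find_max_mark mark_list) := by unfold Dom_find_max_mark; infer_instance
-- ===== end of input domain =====

-- B replaces A's single running-max pass by a two-pass compute-then-locate shape (same O(n) cost).

-- ===== PORT A =====
-- running max with >= (last wins), started at (0, '')
def find_max_mark (mark_list : List (String × Int)) : Int × String :=
  mark_list.foldl (fun st p => if p.2 ≥ st.1 then (p.2, p.1) else st) (0, "")

-- ===== PORT B =====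
def find_max_mark_alt (mark_list : List (String × Int)) : Int × String :=
  let items := mark_list
  -- best = max([0] + [m for _, m in items])
  let best := (items.map Prod.snd).foldl max 0
  -- second pass: last name whose mark equals best
  let name := items.foldl (fun acc p => if p.2 == best then p.1 else acc) ""
  (best, name)

-- ===== PRECONDITION & SPEC =====
def Spec_find_max_mark (mark_list : List (String × Int)) (out : Int × String) : Prop := out = find_max_mark_alt mark_list
instance (mark_list : List (String × Int)) (out : Int × String) : Decidable (Spec_find_max_mark mark_list out) := by unfold Spec_find_max_mark; infer_instance

-- ===== CLAIM (what is proved, stated in full; the proofs are below) =====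
def Claim_equal_find_max_mark : Prop := ∀ (mark_list : List (String × Int)), Dom_find_max_mark mark_list → Spec_find_max_mark mark_list (find_max_mark mark_list)

-- ===== LEMMAS AND PROOFS =====

theorem pv_le_foldl_max (xs : List Int) : ∀ a : Int, a ≤ xs.foldl max a := by
  induction xs with
  | nil => intro a; simp
  | cons x t ih =>
      intro a
      simpa using le_trans (le_max_left a x) (ih (max a x))

theorem pv_foldl_max_mem (xs : List Int) : ∀ a : Int, xs.foldl max a = a ∨ xs.foldl max a ∈ xs := by
  induction xs with
  | nil => intro a; simp
  | cons x t ih =>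
      intro a
      rcases ih (max a x) with h | h
      · rcases le_or_gt x a with hx | hx
        · left; rw [List.foldl_cons, h]; omega
        · right; rw [List.foldl_cons, h, List.mem_cons]; left; omega
      · right; rw [List.foldl_cons]; exact List.mem_cons_of_mem _ h

-- the locate pass ignores its seed once some element attains the target mark
theorem pv_locate_seed_indep (t : List (String × Int)) (M : Int) :
    ∀ s s' : String, (∃ p ∈ t, p.2 = M) →
      t.foldl (fun acc p => if p.2 == M then p.1 else acc) s =
      t.foldl (fun acc p => if p.2 == M then p.1 else acc) s' := by
  induction t with
  | nil => intro s s' h; simp at h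
  | cons q t ih =>
      intro s s' h
      simp only [List.foldl_cons]
      by_cases hq : q.2 == M
      · simp [hq]
      · simp only [hq, Bool.false_eq_true, if_false]
        rcases h with ⟨p, hp, hpM⟩
        rcases List.mem_cons.mp hp with rfl | hp
        · exact absurd (by simpa using hpM) (by simpa using hq)
        · exact ih _ _ ⟨p, hp, hpM⟩

theorem pv_main (l : List (String × Int)) :
    ∀ (c : Int) (s : String),
      l.foldl (fun st p => if p.2 ≥ st.1 then (p.2, p.1) else st) (c, s) =
        ((l.map Prod.snd).foldl max c,
         l.foldl (fun acc p => if p.2 == (l.map Prod.snd).foldl max c then p.1 else acc) s) := by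
  induction l with
  | nil => intro c s; simp
  | cons q t ih =>
      intro c s
      obtain ⟨n, m⟩ := q
      have hseed : (if m ≥ c then ((m : Int), n) else (c, s)) = (max c m, if m ≥ c then n else s) := by
        by_cases h : m ≥ c
        · simp [h]
        · simp [h]; omega
      simp only [List.foldl_cons, List.map_cons]
      rw [show (if (m : Int) ≥ (c, s).1 then ((m : Int), n) else (c, s)) = (max c m, if m ≥ c then n else s) by simpa using hseed]
      rw [ih (max c m) (if m ≥ c then n else s)]
      set M := (t.map Prod.snd).foldl max (max c m) with hM
      have hMge : max c m ≤ M := pv_le_foldl_max _ _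
      have hMmem : M = max c m ∨ M ∈ t.map Prod.snd := pv_foldl_max_mem _ _
      refine Prod.ext rfl ?_
      simp only
      by_cases hm : m = M
      · have hmc : m ≥ c := by omega
        rw [if_pos hmc, if_pos (show ((m : Int) == M) = true by simp [hm])]; rfl
      · rw [if_neg (show ¬ ((m : Int) == M) = true by simp [hm])]
        by_cases hmc : m ≥ c
        · have hMgt : max c m < M := by omega
          have hmem : M ∈ t.map Prod.snd := by
            rcases hMmem with h | h
            · omega
            · exact h
          rcases List.mem_map.mp hmem with ⟨p, hp, hpM⟩
          rw [if_pos hmc]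
          exact pv_locate_seed_indep t M _ _ ⟨p, hp, hpM⟩
        · rw [if_neg hmc]; rfl

-- ===== VERDICT (by name: the statement is the Claim_ definition above) =====
theorem find_max_mark_spec : Claim_equal_find_max_mark := by
  intro l _
  show find_max_mark l = find_max_mark_alt l
  unfold find_max_mark find_max_mark_alt
  simpa using pv_main l 0 ""
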